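-- pv_equiv track=rewrite | github.com/ssghost/PyAlgoZoo | src/set_cover.py | brute_set_cover
-- ===== SOURCE A (Python) =====
-- from itertools import combinations
-- from typing import List, Set, Tuple
--
-- def brute_set_cover(universe: Set[int], setlist: List[Set[int]]) -> Tuple[int, List[Set[int]]]:
-- 	n = len(setlist)
-- 	res = []
-- 	for i in range(1, n+1):
-- 		for subset in combinations(setlist, i):
-- 			if set.union(*subset) == universe:
-- 				res.append(subset)
-- 	return len(res), res
-- ===== SOURCE B (Python) =====
-- def brute_set_cover(universe, setlist):
--     res = []
--
--     def pick(rest, k, acc, chosen):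
--         # rest: remaining sets to choose from, k: how many still to pick,
--         # acc: union of the sets chosen so far, chosen: the sets chosen so far
--         if k == 0:
--             if acc == universe:
--                 res.append(tuple(chosen))
--         elif len(rest) >= k:
--             first, tail = rest[0], rest[1:]
--             pick(tail, k - 1, acc | first, chosen + [first])
--             pick(tail, k, acc, chosen)
--
--     for i in range(1, len(setlist) + 1):
--         pick(setlist, i, set(), [])
--     return len(res), res
-- ===== Notes on version B (the rewrite author's own statement) =====
-- stated objective: alternative
-- what changed: Replaces itertools.combinations plus a from-scratch set.union(*subset) per candidate with a recursive backtracking helper that picks sets left-to-right, threading the running union downward and pruning branches with too few sets left.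
import Mathlib
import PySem

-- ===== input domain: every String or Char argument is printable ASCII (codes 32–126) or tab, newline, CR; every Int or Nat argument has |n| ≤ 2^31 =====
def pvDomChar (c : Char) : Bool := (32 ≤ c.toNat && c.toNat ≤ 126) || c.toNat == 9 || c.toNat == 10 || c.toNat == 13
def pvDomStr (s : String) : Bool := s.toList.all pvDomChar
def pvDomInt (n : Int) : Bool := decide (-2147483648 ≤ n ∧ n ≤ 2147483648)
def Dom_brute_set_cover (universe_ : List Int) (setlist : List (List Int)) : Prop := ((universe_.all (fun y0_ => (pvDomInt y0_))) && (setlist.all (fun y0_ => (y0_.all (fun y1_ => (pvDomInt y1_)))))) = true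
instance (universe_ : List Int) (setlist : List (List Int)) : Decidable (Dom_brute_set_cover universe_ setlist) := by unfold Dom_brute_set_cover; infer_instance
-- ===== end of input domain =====

-- B replaces itertools.combinations + a from-scratch union per candidate by recursive
-- backtracking that threads the running union of the chosen sets (objective: alternative).

-- ===== PORT A =====
-- itertools.combinations(xs, k), in itertools' lexicographic-by-position order
def pyCombos (xs : List (List Int)) (k : Nat) : List (List (List Int)) :=
  match k, xs with
  | 0, _ => [[]]
  | _ + 1, [] => []
  | k' + 1, x :: t => (pyCombos t k').map (fun c => x :: c) ++ pyCombos t (k' + 1)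

def brute_set_cover (universe_ : List Int) (setlist : List (List Int)) : Int × List (List (List Int)) :=
  let n := setlist.length
  let res := (PySem.List.pyRange 1 ((n : Int) + 1) 1).foldl
    (fun res i =>
      (pyCombos setlist i.toNat).foldl
        (fun res subset =>
          -- set.union(*subset) == universe; subset is nonempty (i ≥ 1), so the
          -- union starting from the empty set is exactly set.union(*subset)
          if PySem.Set.equal (subset.foldl (fun a s => PySem.Set.union a s) PySem.Set.empty) universe_
          then res ++ [subset] else res)
        res)
    []
  ((res.length : Int), res)

-- ===== PORT B =====
-- the nested 'pick' of Source B; res is the closed-over accumulator, returned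
def pickAlt (universe_ : List Int) :
    List (List Int) → Nat → PySem.Set Int → List (List Int) → List (List (List Int)) → List (List (List Int))
  | _, 0, acc, chosen, res =>
      if PySem.Set.equal acc universe_ then res ++ [chosen] else res
  | [], _ + 1, _, _, res => res          -- len(rest) >= k fails
  | s :: tail, k + 1, acc, chosen, res =>
      if tail.length + 1 ≥ k + 1 then
        pickAlt universe_ tail (k + 1) acc chosen
          (pickAlt universe_ tail k (PySem.Set.union acc s) (chosen ++ [s]) res)
      else res

def brute_set_cover_alt (universe_ : List Int) (setlist : List (List Int)) : Int × List (List (List Int)) :=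
  let res := (PySem.List.pyRange 1 ((setlist.length : Int) + 1) 1).foldl
    (fun res i => pickAlt universe_ setlist i.toNat PySem.Set.empty [] res) []
  ((res.length : Int), res)

-- ===== PRECONDITION & SPEC =====
def Spec_brute_set_cover (universe_ : List Int) (setlist : List (List Int)) (out : Int × List (List (List Int))) : Prop := out = brute_set_cover_alt universe_ setlist
instance (universe_ : List Int) (setlist : List (List Int)) (out : Int × List (List (List Int))) : Decidable (Spec_brute_set_cover universe_ setlist out) := by unfold Spec_brute_set_cover; infer_instance

-- ===== CLAIM (what is proved, stated in full; the proofs are below) =====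
def Claim_equal_brute_set_cover : Prop := ∀ (universe_ : List Int) (setlist : List (List Int)), Dom_brute_set_cover universe_ setlist → Spec_brute_set_cover universe_ setlist (brute_set_cover universe_ setlist)

-- ===== LEMMAS AND PROOFS =====

theorem pyCombos_eq_nil_of_lt : ∀ (xs : List (List Int)) (k : Nat), xs.length < k → pyCombos xs k = [] := by
  intro xs
  induction xs with
  | nil => intro k h; cases k with
    | zero => omega
    | succ k => rfl
  | cons x t ih =>
    intro k h
    cases k with
    | zero => omega
    | succ k =>
      simp only [List.length_cons] at h
      simp only [pyCombos, ih k (by omega), ih (k + 1) (by omega), List.map_nil, List.nil_append]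

theorem pickAlt_eq (u : List Int) :
    ∀ (rest : List (List Int)) (k : Nat) (acc : PySem.Set Int) (chosen : List (List Int)) (res : List (List (List Int))),
      pickAlt u rest k acc chosen res =
        res ++ ((pyCombos rest k).filter
            (fun c => PySem.Set.equal (c.foldl (fun a s => PySem.Set.union a s) acc) u)).map
          (fun c => chosen ++ c) := by
  intro rest
  induction rest with
  | nil =>
    intro k acc chosen res
    cases k with
    | zero =>
      simp only [pickAlt, pyCombos]
      cases h : PySem.Set.equal acc u <;> simp [List.filter, List.foldl_nil, h]
    | succ k => simp [pickAlt, pyCombos]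
  | cons s tail ih =>
    intro k acc chosen res
    cases k with
    | zero =>
      simp only [pickAlt, pyCombos]
      cases h : PySem.Set.equal acc u <;> simp [List.filter, List.foldl_nil, h]
    | succ k =>
      simp only [pickAlt]
      by_cases hlen : tail.length + 1 ≥ k + 1
      · simp only [if_pos hlen, ih, pyCombos, List.filter_append, List.filter_map,
          List.map_append, List.map_map, List.append_assoc]
        simp [Function.comp_def, List.foldl_cons]
      · simp only [if_neg hlen]
        have h1 : pyCombos tail k = [] := pyCombos_eq_nil_of_lt tail k (by omega)
        have h2 : pyCombos tail (k + 1) = [] := pyCombos_eq_nil_of_lt tail (k + 1) (by omega)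
        simp [pyCombos, h1, h2]

-- ===== VERDICT (by name: the statement is the Claim_ definition above) =====
theorem brute_set_cover_spec : Claim_equal_brute_set_cover := by
  intro universe_ setlist _
  unfold Spec_brute_set_cover brute_set_cover brute_set_cover_alt
  have hstep : ∀ (res : List (List (List Int))) (i : Int),
      (pyCombos setlist i.toNat).foldl
        (fun res subset =>
          if PySem.Set.equal (subset.foldl (fun a s => PySem.Set.union a s) PySem.Set.empty) universe_
          then res ++ [subset] else res) res
        = pickAlt universe_ setlist i.toNat PySem.Set.empty [] res := by
    intro res i
    rw [PySem.List.foldl_append_if_eq_filter, pickAlt_eq]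
    simp
  simp only [hstep]
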